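-- pv_equiv track=rewrite | github.com/NaReddyJashwanthReddy/basicpythonprojects | Flames/pythoncode.py | flames
-- ===== SOURCE A (Python) =====
-- def remove_common_chars(name1, name2):
--
--
--   name1_lower = name1.lower()
--   name2_lower = name2.lower()
--   for char in name1_lower:
--     if char in name2_lower:
--       name1_lower = name1_lower.replace(char, '', 1)
--       name2_lower = name2_lower.replace(char, '', 1)
--   return name1_lower, name2_lower
--
-- def flames(name1, name2):
--
--   name1, name2 = remove_common_chars(name1, name2)
--   combined_length = len(name1) + len(name2)
--   flames = "FLAMES"
--
--   index = 0
--   while len(flames) > 1: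
--     step = combined_length % len(flames)
--     index = (index + step) % len(flames)
--     flames = flames[:index] + flames[index + 1:]
--
--   return flames
-- ===== SOURCE B (Python) =====
-- def flames(name1, name2):
--     a = name1.lower()
--     b = name2.lower()
--     # count common characters greedily against a multiset of b's characters
--     counts = {}
--     for c in b:
--         counts[c] = counts.get(c, 0) + 1
--     matches = 0
--     for c in a:
--         if counts.get(c, 0) > 0:
--             counts[c] -= 1
--             matches += 1
--     combined_length = len(a) + len(b) - 2 * matches
--     # Josephus survivor recurrence with step k = combined_length + 1
--     pos = 0
--     for n in range(2, 7):
--         pos = (pos + combined_length + 1) % n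
--     return "FLAMES"[pos]
-- ===== Notes on version B (the rewrite author's own statement) =====
-- stated objective: faster
-- what changed: Replaces the quadratic string-mutation removal loop by a single-pass character counter, and replaces the simulated repeated-removal loop over 'FLAMES' by the closed-form Josephus survivor recurrence pos=(pos+L+1)%n for n=2..6.
import Mathlib
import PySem

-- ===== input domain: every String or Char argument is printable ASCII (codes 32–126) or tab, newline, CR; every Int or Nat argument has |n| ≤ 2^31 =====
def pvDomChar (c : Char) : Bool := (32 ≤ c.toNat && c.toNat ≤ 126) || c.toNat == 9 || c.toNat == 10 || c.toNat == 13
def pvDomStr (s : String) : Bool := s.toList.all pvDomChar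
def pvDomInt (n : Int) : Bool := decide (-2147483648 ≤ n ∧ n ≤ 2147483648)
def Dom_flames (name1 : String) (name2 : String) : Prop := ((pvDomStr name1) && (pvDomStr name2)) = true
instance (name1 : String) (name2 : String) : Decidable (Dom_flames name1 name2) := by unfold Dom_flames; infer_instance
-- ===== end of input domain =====

-- B replaces A's string-mutation removal loop by a character counter and A's
-- repeated-removal simulation over "FLAMES" by the Josephus survivor recurrence.

-- ===== PORT A =====
-- strings are worked on as List Char; s.replace(c, '', 1) for a single char c is
-- List.erase (first occurrence, no-op if absent) — exact; 'char in s' for a 1-char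
-- char is list membership — exact.
def rccStep (st : List Char × List Char) (c : Char) : List Char × List Char :=
  if c ∈ st.2 then (st.1.erase c, st.2.erase c) else st

-- the Python for-loop iterates over the ORIGINAL lowered name1 (strings are
-- immutable; reassignment does not affect the iterator) — hence foldl over `a`.
def removeCommonChars (name1 : String) (name2 : String) : List Char × List Char :=
  let a := PySem.Chars.lower name1.toList
  let b := PySem.Chars.lower name2.toList
  a.foldl rccStep (a, b)

-- the while-loop: fuel = initial length (each iteration shortens the list by 1);
-- flames[:i] + flames[i+1:] with 0 ≤ i < len is take i ++ drop (i+1) — exact.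
def flamesLoop (L : Nat) : Nat → List Char → Nat → List Char
  | 0, fl, _ => fl
  | fuel + 1, fl, index =>
    if fl.length > 1 then
      let step := L % fl.length
      let index' := (index + step) % fl.length
      flamesLoop L fuel (fl.take index' ++ fl.drop (index' + 1)) index'
    else fl

def flames (name1 : String) (name2 : String) : String :=
  let p := removeCommonChars name1 name2
  let combined := p.1.length + p.2.length
  String.mk (flamesLoop combined 6 "FLAMES".toList 0)

-- ===== PORT B =====
-- counts[c] = counts.get(c, 0) + 1 / counts[c] -= 1 are Dict.modify with default 0.
def cntStep (st : PySem.Dict Char Int × Int) (c : Char) : PySem.Dict Char Int × Int :=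
  if st.1.getD c 0 > 0 then (st.1.modify c 0 (· - 1), st.2 + 1) else st

def josephusPos (L : Int) : Int :=
  (PySem.List.pyRange 2 7 1).foldl (fun p n => PySem.Int.mod (p + L + 1) n) 0

def flames_alt (name1 : String) (name2 : String) : String :=
  let a := PySem.Chars.lower name1.toList
  let b := PySem.Chars.lower name2.toList
  let counts := b.foldl (fun d c => d.modify c 0 (· + 1)) PySem.Dict.empty
  let st := a.foldl cntStep (counts, 0)
  let L : Int := (a.length : Int) + (b.length : Int) - 2 * st.2
  -- "FLAMES"[pos]; pos is always in [0, 6), so the none (IndexError) branch is unreachable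
  match PySem.Str.pyGet? "FLAMES" (josephusPos L) with
  | some c => String.mk [c]
  | none => ""

-- ===== PRECONDITION & SPEC =====
def Spec_flames (name1 : String) (name2 : String) (out : String) : Prop := out = flames_alt name1 name2
instance (name1 : String) (name2 : String) (out : String) : Decidable (Spec_flames name1 name2 out) := by unfold Spec_flames; infer_instance

-- ===== CLAIM (what is proved, stated in full; the proofs are below) =====
def Claim_equal_flames : Prop := ∀ (name1 : String) (name2 : String), Dom_flames name1 name2 → Spec_flames name1 name2 (flames name1 name2)

-- ===== LEMMAS AND PROOFS =====

-- A's removal fold and B's counter fold remove/count the same characters: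
-- the remaining combined length equals the original minus twice the match count.
lemma fold_rel (rest : List Char) : ∀ (s1 s2 : List Char) (d : PySem.Dict Char Int) (m : Int),
    (∀ c, d.getD c 0 = (s2.count c : Int)) →
    ((rest : Multiset Char) ≤ (s1 : Multiset Char)) →
    ((rest.foldl rccStep (s1, s2)).1.length : Int) + ((rest.foldl rccStep (s1, s2)).2.length : Int)
      = (s1.length : Int) + (s2.length : Int) - 2 * ((rest.foldl cntStep (d, m)).2 - m) := by
  induction rest with
  | nil => intro s1 s2 d m _ _; simp
  | cons c rest ih =>
    intro s1 s2 d m hc hle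
    have hcmem : c ∈ s1 := by
      have : c ∈ (↑(c :: rest) : Multiset Char) := by simp
      simpa using Multiset.mem_of_le hle this
    have hcond : (c ∈ s2) ↔ (d.getD c 0 > 0) := by
      rw [hc c]
      exact_mod_cast (List.count_pos_iff).symm
    by_cases h : c ∈ s2
    · have hd : d.getD c 0 > 0 := hcond.mp h
      have hstepA : rccStep (s1, s2) c = (s1.erase c, s2.erase c) := by
        simp [rccStep, h]
      have hstepB : cntStep (d, m) c = (d.modify c 0 (· - 1), m + 1) := by
        simp [cntStep, hd]
      have hrle : (↑rest : Multiset Char) ≤ ↑(s1.erase c) := by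
        have h1 : (↑(c :: rest) : Multiset Char).erase c ≤ (↑s1 : Multiset Char).erase c :=
          Multiset.erase_le_erase c hle
        simpa [Multiset.coe_erase] using h1
      have hc' : ∀ c', (d.modify c 0 (· - 1)).getD c' 0 = ((s2.erase c).count c' : Int) := by
        intro c'
        rw [PySem.Dict.getD_modify]
        by_cases hcc : c' = c
        · subst hcc
          rw [if_pos rfl, hc c', List.count_erase_self]
          have : 0 < s2.count c' := List.count_pos_iff.mpr h
          omega
        · rw [if_neg hcc, hc c', List.count_erase_of_ne hcc]
      have := ih (s1.erase c) (s2.erase c) (d.modify c 0 (· - 1)) (m + 1) hc' hrle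
      simp only [List.foldl_cons, hstepA, hstepB]
      rw [this]
      have l1 : (s1.erase c).length = s1.length - 1 := List.length_erase_of_mem hcmem
      have l2 : (s2.erase c).length = s2.length - 1 := List.length_erase_of_mem h
      have hp1 : 0 < s1.length := List.length_pos_of_mem hcmem
      have hp2 : 0 < s2.length := List.length_pos_of_mem h
      rw [l1, l2]
      push_cast [Nat.cast_sub hp1, Nat.cast_sub hp2]
      ring
    · have hd : ¬ (d.getD c 0 > 0) := fun hh => h (hcond.mpr hh)
      have hstepA : rccStep (s1, s2) c = (s1, s2) := by simp [rccStep, h]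
      have hstepB : cntStep (d, m) c = (d, m) := by simp [cntStep, hd]
      simp only [List.foldl_cons, hstepA, hstepB]
      have hrle : (↑rest : Multiset Char) ≤ ↑s1 :=
        le_trans ((List.sublist_cons_self c rest).subperm) hle
      exact ih s1 s2 d m hc hrle

-- A's elimination loop only reads L modulo the current length (2..6), all of which divide 60.
lemma flamesLoop_mod60 (L : Nat) : ∀ (fuel : Nat) (fl : List Char) (index : Nat),
    fl.length ≤ 6 → flamesLoop L fuel fl index = flamesLoop (L % 60) fuel fl index := by
  intro fuel
  induction fuel with
  | zero => intro fl index _; rfl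
  | succ fuel ih =>
    intro fl index hlen
    by_cases h : fl.length > 1
    · have hdvd : fl.length ∣ 60 := by
        set n := fl.length with hn
        have h2 : 2 ≤ n := h
        have h6 : n ≤ 6 := hlen
        interval_cases n <;> decide
      have hm : L % 60 % fl.length = L % fl.length := Nat.mod_mod_of_dvd L hdvd
      have hpos : 0 < fl.length := by omega
      have hidx : (index + L % fl.length) % fl.length < fl.length := Nat.mod_lt _ hpos
      simp only [flamesLoop, if_pos h, hm]
      apply ih
      have : (fl.take ((index + L % fl.length) % fl.length)
          ++ fl.drop ((index + L % fl.length) % fl.length + 1)).length = fl.length - 1 := by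
        simp only [List.length_append, List.length_take, List.length_drop]
        omega
      omega
    · simp only [flamesLoop, if_neg h]

lemma joseph_step (n : Int) (hpos : 0 < n) (hdvd : n ∣ 60) (L : Nat) (p : Int) :
    PySem.Int.mod (p + (L : Int) + 1) n = PySem.Int.mod (p + ((L % 60 : Nat) : Int) + 1) n := by
  rw [PySem.Int.mod_eq_emod_of_pos hpos, PySem.Int.mod_eq_emod_of_pos hpos]
  have hcast : ((L % 60 : Nat) : Int) = (L : Int) % 60 := by push_cast; ring
  have hLm : (L : Int) % n = ((L : Int) % 60) % n := (Int.emod_emod_of_dvd _ hdvd).symm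
  rw [hcast]
  rw [show p + (L : Int) + 1 = (p + 1) + (L : Int) by ring,
      show p + (L : Int) % 60 + 1 = (p + 1) + (L : Int) % 60 by ring]
  rw [Int.add_emod (p + 1) (L : Int), Int.add_emod (p + 1) ((L : Int) % 60), ← hLm]

lemma josephusPos_mod60 (L : Nat) : josephusPos (L : Int) = josephusPos ((L % 60 : Nat) : Int) := by
  have hr : PySem.List.pyRange 2 7 1 = [2, 3, 4, 5, 6] := by decide
  simp only [josephusPos, hr, List.foldl]
  rw [joseph_step 2 (by decide) (by decide) L,
      joseph_step 3 (by decide) (by decide) L,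
      joseph_step 4 (by decide) (by decide) L,
      joseph_step 5 (by decide) (by decide) L,
      joseph_step 6 (by decide) (by decide) L]

-- for every residue class mod 60 the simulation and the Josephus formula agree
lemma core_eq : ∀ r : Fin 60,
    String.mk (flamesLoop r.val 6 "FLAMES".toList 0)
      = (match PySem.Str.pyGet? "FLAMES" (josephusPos (r.val : Int)) with
         | some c => String.mk [c]
         | none => "") := by
  decide

lemma main_eq (L : Nat) :
    String.mk (flamesLoop L 6 "FLAMES".toList 0)
      = (match PySem.Str.pyGet? "FLAMES" (josephusPos (L : Int)) with
         | some c => String.mk [c]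
         | none => "") := by
  have h60 : L % 60 < 60 := Nat.mod_lt _ (by norm_num)
  rw [flamesLoop_mod60 L 6 _ 0 (by decide), josephusPos_mod60 L]
  exact core_eq ⟨L % 60, h60⟩

-- ===== VERDICT (by name: the statement is the Claim_ definition above) =====
theorem flames_spec : Claim_equal_flames := by
  intro name1 name2 _
  unfold Spec_flames flames flames_alt removeCommonChars
  set a := PySem.Chars.lower name1.toList with ha
  set b := PySem.Chars.lower name2.toList with hb
  have hc0 : ∀ c, (b.foldl (fun d c => d.modify c 0 (· + 1)) PySem.Dict.empty).getD c 0
      = (b.count c : Int) := by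
    intro c
    rw [PySem.Dict.getD_foldl_modify_add_one]
    simp [PySem.Dict.getD]
  have hrel := fold_rel a a b (b.foldl (fun d c => d.modify c 0 (· + 1)) PySem.Dict.empty) 0
    hc0 le_rfl
  have hL : ((a.length : Int) + (b.length : Int)
        - 2 * (a.foldl cntStep (b.foldl (fun d c => d.modify c 0 (· + 1)) PySem.Dict.empty, 0)).2)
      = (((a.foldl rccStep (a, b)).1.length + (a.foldl rccStep (a, b)).2.length : Nat) : Int) := by
    push_cast
    omega
  simp only [hL]
  exact main_eq _
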